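-- pv_equiv track=rewrite | github.com/abhi1kumar/CSE835-Algorithmic-Graph-Theory | pglib/pg.py | prufer
-- ===== SOURCE A (Python) =====
-- import itertools
--
-- def prufer(n):
--     '''
--     Returns a list containing prufer sequences of length n-2; assumes n>=3
--     '''
--     if n <=2:
--         return []
--     l = []
--     x = range(n)
--     for p in itertools.product(x, repeat=(n-2)):
--         l.append(p)
--     return l
-- ===== SOURCE B (Python) =====
-- def prufer(n):
--     '''
--     Returns a list containing prufer sequences of length n-2; assumes n>=3
--     '''
--     if n <= 2:
--         return []
--     k = n - 2
--     out = []
--     for i in range(n ** k):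
--         digits = []
--         x = i
--         for _ in range(k):
--             x, r = divmod(x, n)
--             digits.append(r)
--         digits.reverse()
--         out.append(tuple(digits))
--     return out
-- ===== Notes on version B (the rewrite author's own statement) =====
-- stated objective: alternative
-- what changed: Replaces itertools.product enumeration with rank decoding: each of the n^(n-2) sequences is computed independently from its index by repeated divmod base-n digit extraction, instead of expanding partial tuples.
import Mathlib
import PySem

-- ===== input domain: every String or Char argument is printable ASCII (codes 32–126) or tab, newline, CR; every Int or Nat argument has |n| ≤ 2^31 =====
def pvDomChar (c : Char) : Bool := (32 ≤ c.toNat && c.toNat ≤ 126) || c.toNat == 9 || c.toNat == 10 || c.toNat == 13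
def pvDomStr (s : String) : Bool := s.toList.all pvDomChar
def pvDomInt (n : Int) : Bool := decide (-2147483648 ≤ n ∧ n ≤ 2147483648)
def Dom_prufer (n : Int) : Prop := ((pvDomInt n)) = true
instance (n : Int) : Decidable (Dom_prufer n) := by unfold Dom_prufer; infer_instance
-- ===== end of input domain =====

-- B computes each sequence independently as the base-n digits of its rank i in range(n^(n-2))
-- (divmod loop, then reverse), instead of A's itertools.product expansion; alternative algorithm, same cost.

-- ===== PORT A =====
-- itertools.product(x, repeat = k): first coordinate outermost, later coordinates vary fastest.
def pvProduct (xs : List Int) : Nat → List (List Int)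
  | 0 => [[]]
  | k + 1 => xs.flatMap (fun v => (pvProduct xs k).map (fun t => v :: t))

def prufer (n : Int) : List (List Int) :=
  if n ≤ 2 then []
  else
    -- l = []; for p in product(range(n), repeat=n-2): l.append(p)
    (pvProduct (PySem.List.pyRange 0 n 1) (n - 2).toNat).foldl (fun l p => l ++ [p]) []

-- ===== PORT B =====
-- inner loop: digits = []; x = i; k times: x, r = divmod(x, n); digits.append(r)
def pvDecodeLoop (n : Int) : Nat → Int → List Int → List Int
  | 0, _, digits => digits
  | k + 1, x, digits =>
      pvDecodeLoop n k (PySem.Int.floordiv x n) (digits ++ [PySem.Int.mod x n])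

def prufer_alt (n : Int) : List (List Int) :=
  if n ≤ 2 then []
  else
    -- k = n - 2; out = []; for i in range(n ** k): ... out.append(reversed digits)
    (PySem.List.pyRange 0 (n ^ (n - 2).toNat) 1).foldl
      (fun out i => out ++ [(pvDecodeLoop n (n - 2).toNat i []).reverse]) []

-- ===== PRECONDITION & SPEC =====
def Spec_prufer (n : Int) (out : List (List Int)) : Prop := out = prufer_alt n
instance (n : Int) (out : List (List Int)) : Decidable (Spec_prufer n out) := by unfold Spec_prufer; infer_instance

-- ===== CLAIM (what is proved, stated in full; the proofs are below) =====
def Claim_equal_prufer : Prop := ∀ (n : Int), Dom_prufer n → Spec_prufer n (prufer n)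

-- ===== LEMMAS AND PROOFS =====

-- base-N digits of m, least significant first, k of them
def pvNatDigits (N : Nat) : Nat → Nat → List Nat
  | 0, _ => []
  | k + 1, m => m % N :: pvNatDigits N k (m / N)

theorem pvDecodeLoop_natCast (N : Nat) (k : Nat) :
    ∀ (m : Nat) (t : List Int),
      pvDecodeLoop (N : Int) k (m : Int) t = t ++ (pvNatDigits N k m).map (fun (d : Nat) => (d : Int)) := by
  induction k with
  | zero => intro m t; simp [pvDecodeLoop, pvNatDigits]
  | succ k ih =>
      intro m t
      simp only [pvDecodeLoop, pvNatDigits, PySem.Int.floordiv_natCast, PySem.Int.mod_natCast,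
        ih (m / N)]
      simp

theorem range_mul_flatMap (b : Nat) :
    ∀ (a : Nat), List.range (a * b)
      = (List.range a).flatMap (fun q => (List.range b).map (fun r => q * b + r)) := by
  intro a
  induction a with
  | zero => simp
  | succ a ih =>
      rw [Nat.succ_mul, List.range_add, ih, List.range_succ]
      simp

theorem pvNatDigits_decompose (N k q r : Nat) (hN : 0 < N) (hr : r < N) :
    pvNatDigits N (k + 1) (q * N + r) = r :: pvNatDigits N k q := by
  simp only [pvNatDigits]
  rw [Nat.mul_comm q N, Nat.mul_add_mod, Nat.mod_eq_of_lt hr, Nat.mul_add_div hN,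
    Nat.div_eq_of_lt hr]
  simp

theorem flatMap_singleton_map (xs : List Int) :
    xs.flatMap (fun v => [[v]]) = xs.map (fun v => [v]) := by
  induction xs with
  | nil => rfl
  | cons a t ih => simp [List.flatMap_cons, ih]

-- extending the product on the right: product of k+1 = [t ++ [v] | t in product k, v in xs]
theorem pvProduct_succ_right (xs : List Int) (k : Nat) :
    pvProduct xs (k + 1) = (pvProduct xs k).flatMap (fun t => xs.map (fun v => t ++ [v])) := by
  induction k with
  | zero =>
    show xs.flatMap (fun v => [[v]])
        = ([[]] : List (List Int)).flatMap (fun t => xs.map (fun v => t ++ [v]))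
    rw [flatMap_singleton_map]
    simp
  | succ k ih =>
    conv_lhs => rw [show pvProduct xs (k + 1 + 1)
          = xs.flatMap (fun v => (pvProduct xs (k + 1)).map (fun t => v :: t)) from rfl, ih]
    conv_rhs => rw [show pvProduct xs (k + 1)
          = xs.flatMap (fun v => (pvProduct xs k).map (fun t => v :: t)) from rfl]
    simp [List.flatMap_map, List.map_flatMap, List.map_map, List.flatMap_assoc,
      Function.comp_def]

-- product over range(N) in order = rank decoding of 0 .. N^k - 1
theorem pvProduct_eq_decode (N : Nat) (hN : 0 < N) (k : Nat) :
    pvProduct ((List.range N).map (fun (r : Nat) => (r : Int))) k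
      = (List.range (N ^ k)).map
          (fun m => ((pvNatDigits N k m).map (fun (d : Nat) => (d : Int))).reverse) := by
  induction k with
  | zero => simp [pvProduct, pvNatDigits]
  | succ k ih =>
      rw [pvProduct_succ_right, ih, pow_succ, range_mul_flatMap, List.map_flatMap,
        List.flatMap_map]
      apply List.flatMap_congr
      intro q _
      simp only [List.map_map, Function.comp_def]
      apply List.map_congr_left
      intro r hr
      rw [pvNatDigits_decompose N k q r hN (List.mem_range.mp hr)]
      simp

-- ===== VERDICT (by name: the statement is the Claim_ definition above) =====
theorem prufer_spec : Claim_equal_prufer := by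
  intro n _
  unfold Spec_prufer prufer prufer_alt
  split
  · rfl
  · rename_i hn
    have h3 : 3 ≤ n := by omega
    have hN : n = ((n.toNat : Nat) : Int) := by omega
    set N : Nat := n.toNat with hNdef
    have hNpos : 0 < N := by omega
    have hpow : n ^ (n - 2).toNat = ((N ^ (n - 2).toNat : Nat) : Int) := by
      rw [hN]; push_cast; ring
    rw [PySem.List.foldl_append_singleton_eq_self, hpow, hN]
    rw [PySem.List.pyRange_zero_natCast, PySem.List.pyRange_zero_natCast]
    rw [PySem.List.foldl_append_singleton_eq_map, List.map_map]
    rw [pvProduct_eq_decode N hNpos]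
    simp only [Function.comp_def]
    apply congrArg
    apply List.map_congr_left
    intro m _
    simp [pvDecodeLoop_natCast]
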